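-- pv_equiv track=rewrite | github.com/OLEGShen/part6-core | simulation/dispatch.py | is_valid_route
-- ===== SOURCE A (Python) =====
-- def is_valid_route(route, orders):
--     picked_up_orders = set()
--     for event_type, order_id in route:
--         if event_type == 'pickup':
--             picked_up_orders.add(order_id)
--         else:
--             if order_id not in picked_up_orders:
--                 return False
--             picked_up_orders.remove(order_id)
--     return True
-- ===== SOURCE B (Python) =====
-- def is_valid_route(route, orders):
--     groups = {}
--     for event_type, order_id in route:
--         groups.setdefault(order_id, []).append(event_type)
--     for events in groups.values():
--         held = False
--         for ev in events:
--             if ev == 'pickup':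
--                 held = True
--             elif held:
--                 held = False
--             else:
--                 return False
--     return True
-- ===== Notes on version B (the rewrite author's own statement) =====
-- stated objective: alternative
-- what changed: B groups the route by order_id into per-order event lists once, then validates each order's sequence independently with a boolean held flag, instead of A's single sequential scan maintaining a set of currently-held orders.
import Mathlib
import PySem

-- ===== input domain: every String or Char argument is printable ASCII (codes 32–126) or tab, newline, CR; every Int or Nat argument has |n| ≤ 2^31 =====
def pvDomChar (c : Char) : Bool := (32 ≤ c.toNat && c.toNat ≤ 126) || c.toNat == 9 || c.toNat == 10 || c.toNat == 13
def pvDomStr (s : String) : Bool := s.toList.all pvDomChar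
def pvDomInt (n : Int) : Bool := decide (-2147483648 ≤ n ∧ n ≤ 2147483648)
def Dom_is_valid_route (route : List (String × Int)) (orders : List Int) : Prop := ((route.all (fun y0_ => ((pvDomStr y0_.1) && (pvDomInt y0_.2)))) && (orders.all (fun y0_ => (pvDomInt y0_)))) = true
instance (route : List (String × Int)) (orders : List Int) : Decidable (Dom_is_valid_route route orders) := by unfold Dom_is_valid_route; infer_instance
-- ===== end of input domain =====

-- B groups the route by order_id once and validates each order's event list independently
-- with a boolean 'held' flag (alternative decomposition; same cost as A's sequential set scan).

-- ===== PORT A =====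
def pvAuxA : List (String × Int) → PySem.Set Int → Bool
  | [], _ => true
  | (event_type, order_id) :: rest, picked_up_orders =>
    if event_type = "pickup" then
      pvAuxA rest (PySem.Set.add picked_up_orders order_id)
    else
      if PySem.Set.contains picked_up_orders order_id then
        pvAuxA rest (PySem.Set.discard picked_up_orders order_id)
      else false

def is_valid_route (route : List (String × Int)) (orders : List Int) : Bool :=
  pvAuxA route PySem.Set.empty

-- ===== PORT B =====
def pvCheck : List String → Bool → Bool
  | [], _ => true
  | ev :: rest, held =>
    if ev = "pickup" then pvCheck rest true
    else if held then pvCheck rest false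
    else false

def is_valid_route_alt (route : List (String × Int)) (orders : List Int) : Bool :=
  let groups : PySem.Dict Int (List String) :=
    route.foldl (fun d p => d.modify p.2 [] (· ++ [p.1])) PySem.Dict.empty
  groups.values.all (fun events => pvCheck events false)

-- ===== PRECONDITION & SPEC =====
def Spec_is_valid_route (route : List (String × Int)) (orders : List Int) (out : Bool) : Prop := out = is_valid_route_alt route orders
instance (route : List (String × Int)) (orders : List Int) (out : Bool) : Decidable (Spec_is_valid_route route orders out) := by unfold Spec_is_valid_route; infer_instance

-- ===== CLAIM (what is proved, stated in full; the proofs are below) =====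
def Claim_equal_is_valid_route : Prop := ∀ (route : List (String × Int)) (orders : List Int), Dom_is_valid_route route orders → Spec_is_valid_route route orders (is_valid_route route orders)

-- ===== LEMMAS AND PROOFS =====

-- the events of order `id`, in route order
def pvFilt (id : Int) (route : List (String × Int)) : List String :=
  (route.filter (fun p => p.2 == id)).map Prod.fst

theorem pvFilt_cons_self (ev : String) (id : Int) (rest : List (String × Int)) :
    pvFilt id ((ev, id) :: rest) = ev :: pvFilt id rest := by
  simp [pvFilt]

theorem pvFilt_cons_ne (ev : String) (oid id : Int) (rest : List (String × Int))
    (h : id ≠ oid) : pvFilt id ((ev, oid) :: rest) = pvFilt id rest := by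
  simp [pvFilt, Ne.symm h]

theorem pvFilt_eq_nil_of_not_mem (id : Int) (route : List (String × Int))
    (h : id ∉ route.map Prod.snd) : pvFilt id route = [] := by
  simp only [pvFilt, List.map_eq_nil_iff, List.filter_eq_nil_iff]
  intro p hp hbeq
  exact h (List.mem_map.2 ⟨p, hp, by simpa using hbeq⟩)

-- master characterisation of A's loop
theorem pvAuxA_iff (route : List (String × Int)) : ∀ (S : PySem.Set Int),
    pvAuxA route S = true ↔
      ∀ id ∈ route.map Prod.snd, pvCheck (pvFilt id route) (decide (id ∈ S)) = true := by
  induction route with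
  | nil => intro S; simp [pvAuxA]
  | cons hd rest ih =>
    intro S
    obtain ⟨ev, oid⟩ := hd
    by_cases hev : ev = "pickup"
    · subst hev
      rw [show pvAuxA (("pickup", oid) :: rest) S =
            pvAuxA rest (PySem.Set.add S oid) from by simp [pvAuxA]]
      rw [ih]
      constructor
      · intro H id hid
        rw [List.map_cons] at hid
        rcases List.mem_cons.1 hid with h | h
        · subst h
          rw [pvFilt_cons_self]
          by_cases hm : id ∈ rest.map Prod.snd
          · have := H id hm
            rw [show (decide (id ∈ PySem.Set.add S id)) = true from by
              simp [PySem.Set.mem_add]] at this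
            simp [pvCheck, this]
          · rw [pvFilt_eq_nil_of_not_mem id rest hm]
            simp [pvCheck]
        · by_cases heq : id = oid
          · subst heq
            rw [pvFilt_cons_self]
            have := H id h
            rw [show (decide (id ∈ PySem.Set.add S id)) = true from by
              simp [PySem.Set.mem_add]] at this
            simp [pvCheck, this]
          · rw [pvFilt_cons_ne _ _ _ _ heq]
            have := H id h
            rwa [show (decide (id ∈ PySem.Set.add S oid)) = decide (id ∈ S) from by
              simp [PySem.Set.mem_add, heq]] at this
      · intro H id hid
        by_cases heq : id = oid
        · subst heq
          have := H id (by simp)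
          rw [pvFilt_cons_self] at this
          simp only [pvCheck, if_pos] at this
          rwa [show (decide (id ∈ PySem.Set.add S id)) = true from by
            simp [PySem.Set.mem_add]]
        · have := H id (by simp [hid])
          rw [pvFilt_cons_ne _ _ _ _ heq] at this
          rwa [show (decide (id ∈ PySem.Set.add S oid)) = decide (id ∈ S) from by
            simp [PySem.Set.mem_add, heq]]
    · by_cases hm : PySem.Set.contains S oid
      · have hmem : oid ∈ S := (PySem.Set.contains_iff S oid).1 hm
        rw [show pvAuxA ((ev, oid) :: rest) S = pvAuxA rest (PySem.Set.discard S oid) from by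
          simp only [pvAuxA]; rw [if_neg hev, if_pos hm]]
        rw [ih]
        constructor
        · intro H id hid
          rw [List.map_cons] at hid
          rcases List.mem_cons.1 hid with h | h
          · subst h
            rw [pvFilt_cons_self]
            simp only [pvCheck, if_neg hev, decide_eq_true hmem]
            by_cases hr : id ∈ rest.map Prod.snd
            · have := H id hr
              rwa [show (decide (id ∈ PySem.Set.discard S id)) = false from by
                simp [PySem.Set.mem_discard]] at this
            · rw [pvFilt_eq_nil_of_not_mem id rest hr]; simp [pvCheck]
          · by_cases heq : id = oid
            · subst heq
              rw [pvFilt_cons_self]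
              simp only [pvCheck, if_neg hev, decide_eq_true hmem]
              have := H id h
              rwa [show (decide (id ∈ PySem.Set.discard S id)) = false from by
                simp [PySem.Set.mem_discard]] at this
            · rw [pvFilt_cons_ne _ _ _ _ heq]
              have := H id h
              rwa [show (decide (id ∈ PySem.Set.discard S oid)) = decide (id ∈ S) from by
                simp [PySem.Set.mem_discard, heq]] at this
        · intro H id hid
          by_cases heq : id = oid
          · subst heq
            have := H id (by simp)
            rw [pvFilt_cons_self] at this
            simp only [pvCheck, if_neg hev, decide_eq_true hmem] at this
            rwa [show (decide (id ∈ PySem.Set.discard S id)) = false from by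
              simp [PySem.Set.mem_discard]]
          · have := H id (by simp [hid])
            rw [pvFilt_cons_ne _ _ _ _ heq] at this
            rwa [show (decide (id ∈ PySem.Set.discard S oid)) = decide (id ∈ S) from by
              simp [PySem.Set.mem_discard, heq]]
      · have hnm : oid ∉ S := fun h => hm ((PySem.Set.contains_iff S oid).2 h)
        rw [show pvAuxA ((ev, oid) :: rest) S = false from by
          simp only [pvAuxA]; rw [if_neg hev, if_neg hm]]
        constructor
        · intro h; exact absurd h (by simp)
        · intro H
          have := H oid (by simp)
          rw [pvFilt_cons_self] at this
          simp [pvCheck, hev, hnm] at this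

-- characterisation of B's grouped validation
theorem pvAlt_iff (route : List (String × Int)) (orders : List Int) :
    is_valid_route_alt route orders = true ↔
      ∀ id ∈ route.map Prod.snd, pvCheck (pvFilt id route) false = true := by
  unfold is_valid_route_alt
  have hrw : route.foldl (fun d p => d.modify p.2 [] (· ++ [p.1])) PySem.Dict.empty
      = (route.map Prod.swap).foldl (fun d q => d.modify q.1 [] (· ++ [q.2])) PySem.Dict.empty := by
    rw [List.foldl_map]; simp only [Prod.fst_swap, Prod.snd_swap]
  rw [hrw]
  set G := (route.map Prod.swap).foldl (fun d q => d.modify q.1 [] (· ++ [q.2]))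
      PySem.Dict.empty with hG
  have hkeys : G.keys = PySem.Set.ofList (route.map Prod.snd) := by
    rw [hG, PySem.Dict.keys_foldl_modify_key]
    simp [PySem.Set.update_nil_left, List.map_map, Function.comp_def]
  have hnd : G.keys.Nodup := by
    rw [hkeys]; exact PySem.Set.nodup_ofList (route.map Prod.snd)
  have hget : ∀ k, G.getD k [] = pvFilt k route := by
    intro k
    rw [hG, PySem.Dict.getD_foldl_modify_append]
    simp [pvFilt, List.filter_map, Function.comp_def]
  show (G.values.all fun events => pvCheck events false) = true ↔ _
  rw [PySem.Dict.values_eq_map_keys G hnd [], List.all_map, List.all_eq_true]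
  constructor
  · intro H id hid
    have := H id (by rw [hkeys]; exact (PySem.Set.mem_ofList _ _).2 hid)
    simpa [hget id] using this
  · intro H k hk
    have hk' : k ∈ route.map Prod.snd := (PySem.Set.mem_ofList _ _).1 (hkeys ▸ hk)
    simpa [hget k] using H k hk'

-- ===== VERDICT (by name: the statement is the Claim_ definition above) =====
theorem is_valid_route_spec : Claim_equal_is_valid_route := by
  intro route orders _
  unfold Spec_is_valid_route is_valid_route
  rw [Bool.eq_iff_iff, pvAuxA_iff, pvAlt_iff route orders]
  constructor <;> intro H id hid <;> have := H id hid <;>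
    simpa [PySem.Set.empty] using this
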